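-- pv_equiv track=rewrite | github.com/StarSein/BaekJoon | 백준/Gold/1083. 소트/소트.py | solution
-- ===== SOURCE A (Python) =====
-- from typing import List
--
-- def solution(N: int, nums: List[int], S: int) -> List[int]:
--     for i in range(N):
--         max_num = nums[i]
--         max_pos = i
--         for j in range(1, min(N - i, S + 1)):
--             if nums[i + j] > max_num:
--                 max_num = nums[i + j]
--                 max_pos = i + j
--         if max_pos == i:
--             continue
--         for j in range(max_pos, i, -1):
--             nums[j - 1], nums[j] = nums[j], nums[j - 1]
--         S -= (max_pos - i)
--     return nums
-- ===== SOURCE B (Python) =====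
-- from typing import List
--
-- def solution(N: int, nums: List[int], S: int) -> List[int]:
--     # Greedy: repeatedly pop the leftmost maximum of the first s+1 remaining
--     # elements to the output, consuming a working list (no in-place swap loops).
--     n = max(N, 0)
--     rest = nums[n:]
--     lst = nums[:n]
--     out = []
--     s = S
--     while lst:
--         w = lst[:max(s, 0) + 1]
--         p = w.index(max(w))
--         out.append(lst.pop(p))
--         s -= p
--     nums[:] = out + rest
--     return nums
-- ===== Notes on version B (the rewrite author's own statement) =====
-- stated objective: alternative
-- what changed: B pops the leftmost maximum of the first s+1 remaining elements from a shrinking working list and appends it to a growing output, instead of A's in-place adjacent-swap rotations over one array with index bookkeeping and an explicit inner argmax scan.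
import Mathlib
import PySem

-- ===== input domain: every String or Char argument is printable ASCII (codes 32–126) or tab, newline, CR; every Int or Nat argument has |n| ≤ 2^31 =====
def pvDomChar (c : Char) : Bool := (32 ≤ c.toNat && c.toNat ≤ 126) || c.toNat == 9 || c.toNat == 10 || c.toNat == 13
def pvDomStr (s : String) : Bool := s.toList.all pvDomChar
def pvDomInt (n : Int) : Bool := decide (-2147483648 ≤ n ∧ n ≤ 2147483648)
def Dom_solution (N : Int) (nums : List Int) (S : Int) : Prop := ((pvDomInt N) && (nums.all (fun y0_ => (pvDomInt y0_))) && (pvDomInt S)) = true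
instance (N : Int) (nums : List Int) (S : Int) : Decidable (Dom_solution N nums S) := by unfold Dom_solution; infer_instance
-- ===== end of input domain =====

-- B consumes a working list by popping the chosen window maximum to a growing output instead of
-- A's in-place adjacent-swap rotations; equivalence is about the RETURN value (the Python B ends
-- with nums[:] = result, performing the same final mutation as A).

-- ===== PORT A =====
-- inner loop: for j in range(1, min(N - i, S + 1)): track (max_num, max_pos)
def solInner (ns : List Int) (i : Int) (W : Int) : Int × Int :=
  (PySem.List.pyRange 1 W 1).foldl
    (fun (acc : Int × Int) j =>
      if PySem.List.pyGetD ns (i + j) 0 > acc.1 then (PySem.List.pyGetD ns (i + j) 0, i + j) else acc)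
    (PySem.List.pyGetD ns i 0, i)

-- swap loop body: nums[j-1], nums[j] = nums[j], nums[j-1]
def solSwapStep (ms : List Int) (j : Int) : List Int :=
  PySem.List.pySetD (PySem.List.pySetD ms (j - 1) (PySem.List.pyGetD ms j 0)) j
    (PySem.List.pyGetD ms (j - 1) 0)

-- swap loop: for j in range(max_pos, i, -1)
def solSwap (ms : List Int) (hi i : Int) : List Int :=
  (PySem.List.pyRange hi i (-1)).foldl solSwapStep ms

-- one iteration of the outer loop (state = (nums, S))
def solBody (N : Int) (st : List Int × Int) (i : Int) : List Int × Int :=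
  let mp := solInner st.1 i (min (N - i) (st.2 + 1))
  if mp.2 = i then st
  else (solSwap st.1 mp.2 i, st.2 - (mp.2 - i))

def solution (N : Int) (nums : List Int) (S : Int) : List Int :=
  ((PySem.List.pyRange 0 N 1).foldl (solBody N) (nums, S)).1

-- ===== PORT B =====
-- while lst: w = lst[:max(s,0)+1]; p = w.index(max(w)); out.append(lst.pop(p)); s -= p
-- lst.pop(p) = (lst[p], lst.eraseIdx p); the loop runs exactly len(lst) times (each pop removes
-- one element), so it is transcribed with fuel = lst.length (the fuel-0 branch is unreachable).
def solAltGoF : Nat → List Int → Int → List Int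
  | _, [], _ => []
  | 0, _ :: _, _ => []
  | fuel + 1, x :: t, s =>
    let w := PySem.List.slice (x :: t) none (some (max s 0 + 1))
    let m := (PySem.List.max? w (fun y => y)).getD 0
    let p := (PySem.List.index? w m).getD 0
    PySem.List.pyGetD (x :: t) (p : Int) 0 :: solAltGoF fuel ((x :: t).eraseIdx p) (s - (p : Int))

def solAltGo (lst : List Int) (s : Int) : List Int := solAltGoF lst.length lst s

def solution_alt (N : Int) (nums : List Int) (S : Int) : List Int :=
  let n := max N 0
  let rest := PySem.List.slice nums (some n) none
  let lst := PySem.List.slice nums none (some n)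
  solAltGo lst S ++ rest

-- ===== PRECONDITION & SPEC =====
-- Pre_: A raises IndexError as soon as an index ≥ len(nums) is read, which happens iff N > len(nums).
def Pre_solution (N : Int) (nums : List Int) (S : Int) : Prop := N ≤ (nums.length : Int)
instance (N : Int) (nums : List Int) (S : Int) : Decidable (Pre_solution N nums S) := by unfold Pre_solution; infer_instance
def pvWitness_solution : Int × List Int × Int := (3, [1, 3, 2], 2)

def Spec_solution (N : Int) (nums : List Int) (S : Int) (out : List Int) : Prop := out = solution_alt N nums S
instance (N : Int) (nums : List Int) (S : Int) (out : List Int) : Decidable (Spec_solution N nums S out) := by unfold Spec_solution; infer_instance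

-- ===== CLAIM (what is proved, stated in full; the proofs are below) =====
def Claim_equal_solution : Prop := ∀ (N : Int) (nums : List Int) (S : Int), Dom_solution N nums S → Pre_solution N nums S → Spec_solution N nums S (solution N nums S)

-- ===== LEMMAS AND PROOFS =====

theorem pv_getD_head (done : List Int) (x : Int) (t tail : List Int) :
    PySem.List.pyGetD (done ++ (x :: t) ++ tail) ((done.length : Int)) 0 = x := by
  rw [PySem.List.pyGetD_natCast]
  simp [List.getD, List.getElem?_append_right (Nat.le_refl done.length)]

theorem pv_getD_mid (done : List Int) (x : Int) (t tail : List Int) (k : Nat) (hk : k < t.length) :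
    PySem.List.pyGetD (done ++ (x :: t) ++ tail) ((done.length : Int) + 1 + (k : Int)) 0 = t.getD k 0 := by
  have : (done.length : Int) + 1 + (k : Int) = ((done.length + 1 + k : Nat) : Int) := by push_cast; ring
  rw [this, PySem.List.pyGetD_natCast]
  have h1 : done.length ≤ done.length + 1 + k := by omega
  simp [List.getD, List.getElem?_append_right h1, List.getElem?_append_left, List.getElem?_cons,
    Nat.add_comm, Nat.add_sub_cancel_left]
  rw [Nat.add_comm k (done.length + 1)]
  have h2 : done.length + 1 + k = done.length + (1 + k) := by omega
  rw [h2, List.getElem?_append_right (by omega), Nat.add_sub_cancel_left]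
  simp [List.getElem?_cons, List.getElem?_append_left hk, List.getD]

def pvU (t : List Int) (s : Int) : List Int := t.take (max s 0).toNat
def pvM (x : Int) (t : List Int) (s : Int) : Int := (pvU t s).foldl max x
def pvP (x : Int) (t : List Int) (s : Int) : Nat := (x :: pvU t s).idxOf (pvM x t s)

theorem pv_scan (u : List Int) : ∀ (mx pos base : Int),
    (List.range u.length).foldl
        (fun (acc : Int × Int) k => if u.getD k 0 > acc.1 then (u.getD k 0, base + (k : Int)) else acc)
        (mx, pos)
      = (u.foldl max mx,
         if mx < u.foldl max mx then base + ((u.idxOf (u.foldl max mx) : Nat) : Int) else pos) := by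
  induction u with
  | nil => intro mx pos base; simp
  | cons y ys ih =>
    intro mx pos base
    rw [List.length_cons, List.range_succ_eq_map, List.foldl_cons, List.foldl_map]
    simp only [Nat.succ_eq_add_one]
    have hbody : ∀ (acc : Int × Int) (k : Nat), k ∈ List.range ys.length →
        (if (y :: ys).getD (k + 1) 0 > acc.1 then ((y :: ys).getD (k + 1) 0, base + ((k + 1 : Nat) : Int)) else acc)
        = (if ys.getD k 0 > acc.1 then (ys.getD k 0, (base + 1) + (k : Int)) else acc) := by
      intro acc k _
      simp only [List.getD_cons_succ]
      have : base + ((k + 1 : Nat) : Int) = (base + 1) + (k : Int) := by push_cast; ring_nf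
      rw [this]
    rw [PySem.List.foldl_congr_mem (List.range ys.length)
      (fun (acc : Int × Int) (k : Nat) => if (y :: ys).getD (k + 1) 0 > acc.1 then ((y :: ys).getD (k + 1) 0, base + ((k + 1 : Nat) : Int)) else acc)
      (fun (acc : Int × Int) (k : Nat) => if ys.getD k 0 > acc.1 then (ys.getD k 0, (base + 1) + (k : Int)) else acc)
      _ hbody]
    simp only [List.getD_cons_zero, List.foldl_cons, Nat.cast_zero, add_zero]
    by_cases hy : y > mx
    · rw [if_pos hy]
      rw [ih y base (base + 1)]
      have hmax : max mx y = y := by omega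
      rw [hmax]
      set M := ys.foldl max y with hM
      have hyM : y ≤ M := (PySem.List.le_foldl_max ys y).1
      have hmxM : mx < M := lt_of_lt_of_le hy hyM
      rw [if_pos hmxM]
      by_cases hyeq : y = M
      · have h0 : (y :: ys).idxOf M = 0 := by rw [hyeq]; simp [List.idxOf_cons_self]
        rw [h0]
        have : ¬ y < M := by omega
        rw [if_neg this]
        simp
      · have hlt : y < M := lt_of_le_of_ne hyM hyeq
        rw [if_pos hlt, List.idxOf_cons_ne _ hyeq]
        push_cast; ring_nf
    · rw [if_neg hy]
      rw [ih mx pos (base + 1)]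
      have hmax : max mx y = mx := by omega
      rw [hmax]
      set M := ys.foldl max mx with hM
      by_cases hmxM : mx < M
      · rw [if_pos hmxM, if_pos hmxM]
        have hyne : y ≠ M := by omega
        rw [List.idxOf_cons_ne _ hyne]
        push_cast; ring_nf
      · rw [if_neg hmxM, if_neg hmxM]

theorem pv_swap_step (pre : List Int) (b m : Int) (rest : List Int) :
    solSwapStep (pre ++ b :: m :: rest) ((pre.length : Int) + 1) = pre ++ m :: b :: rest := by
  unfold solSwapStep
  have h1 : (pre.length : Int) + 1 - 1 = (pre.length : Int) := by ring
  have h2 : (pre.length : Int) + 1 = ((pre.length + 1 : Nat) : Int) := by push_cast; ring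
  rw [h1, h2]
  simp only [PySem.List.pyGetD_natCast, PySem.List.pySetD_natCast]
  -- evaluate the two reads
  have hget1 : (pre ++ b :: m :: rest).getD (pre.length + 1) 0 = m := by
    simp [List.getD, List.getElem?_append_right (show pre.length ≤ pre.length + 1 by omega)]
  have hget0 : (pre ++ b :: m :: rest).getD pre.length 0 = b := by
    simp [List.getD, List.getElem?_append_right (Nat.le_refl pre.length)]
  have hset1 : (pre ++ b :: m :: rest).set pre.length m = pre ++ m :: m :: rest := by
    rw [List.set_append_right _ _ (Nat.le_refl pre.length)]
    simp
  rw [hget1, hget0, hset1]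
  rw [List.set_append_right _ _ (show pre.length ≤ pre.length + 1 by omega)]
  simp

theorem pv_rot (c : List Int) : ∀ (done : List Int) (m : Int) (rest : List Int),
    solSwap (done ++ c ++ m :: rest) ((done.length : Int) + (c.length : Int)) (done.length : Int)
      = done ++ m :: (c ++ rest) := by
  induction c using List.reverseRecOn with
  | nil =>
    intro done m rest
    unfold solSwap
    rw [PySem.List.pyRange_neg_one_eq_nil (by simp)]
    simp
  | append_singleton c' b ih =>
    intro done m rest
    unfold solSwap
    have hlen : (done.length : Int) + ((c' ++ [b]).length : Int) = ((done ++ c').length : Int) + 1 := by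
      push_cast [List.length_append]; simp; ring
    rw [hlen, PySem.List.pyRange_neg_one_cons (by push_cast [List.length_append]; omega), List.foldl_cons]
    have hshape : done ++ (c' ++ [b]) ++ m :: rest = (done ++ c') ++ b :: m :: rest := by simp
    rw [hshape, pv_swap_step]
    have hback : (done ++ c') ++ m :: b :: rest = done ++ c' ++ m :: (b :: rest) := by simp
    have harg : ((done ++ c').length : Int) + 1 - 1 = (done.length : Int) + (c'.length : Int) := by
      push_cast [List.length_append]; ring
    rw [hback, harg]
    have := ih done m (b :: rest)
    unfold solSwap at this
    rw [this]
    simp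

theorem pv_w_eq (x : Int) (t : List Int) (s : Int) :
    PySem.List.slice (x :: t) none (some (max s 0 + 1)) = x :: pvU t s := by
  rw [PySem.List.slice_to (x :: t) (by omega)]
  have : (max s 0 + 1).toNat = (max s 0).toNat + 1 := by omega
  rw [this, List.take_succ_cons, pvU]

theorem pv_m_mem (x : Int) (t : List Int) (s : Int) : pvM x t s ∈ x :: pvU t s := by
  rcases PySem.List.foldl_max_mem (pvU t s) x with h | h
  · rw [pvM, h]; exact List.mem_cons_self
  · exact List.mem_cons_of_mem _ h

theorem pv_p_lt (x : Int) (t : List Int) (s : Int) : pvP x t s < (x :: pvU t s).length :=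
  List.idxOf_lt_length_of_mem (pv_m_mem x t s)

theorem pv_p_le (x : Int) (t : List Int) (s : Int) : pvP x t s ≤ t.length := by
  have h := pv_p_lt x t s
  simp only [List.length_cons, pvU, List.length_take] at h
  omega

theorem pv_elem_p (x : Int) (t : List Int) (s : Int) :
    PySem.List.pyGetD (x :: t) ((pvP x t s : Nat) : Int) 0 = pvM x t s := by
  rw [PySem.List.pyGetD_natCast]
  have hlt := pv_p_lt x t s
  have hw : (x :: pvU t s).take (t.length + 1) = x :: pvU t s := by
    apply List.take_of_length_le
    simp only [List.length_cons, pvU, List.length_take]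
    omega
  have hpref : (x :: pvU t s) = (x :: t).take ((max s 0).toNat + 1) := by
    rw [List.take_succ_cons, pvU]
  have hgl : (x :: t)[pvP x t s]? = some (pvM x t s) := by
    have h1 : (x :: pvU t s)[pvP x t s]? = some (pvM x t s) := by
      rw [List.getElem?_eq_getElem hlt]
      exact congrArg some (List.getElem_idxOf hlt)
    rw [hpref] at h1
    rwa [List.getElem?_take_of_lt (by
      have h2 := hlt
      rw [hpref] at h2
      simp only [List.length_take] at h2
      omega)] at h1
  simp [List.getD, hgl]

theorem pv_idxOf?_eq (l : List Int) (a : Int) (h : a ∈ l) : l.idxOf? a = some (l.idxOf a) := by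
  induction l with
  | nil => simp at h
  | cons b bs ih =>
    by_cases hb : b = a
    · subst hb; simp [List.idxOf?_cons, List.idxOf_cons_self]
    · rcases List.mem_cons.1 h with h1 | h1
      · exact absurd h1.symm hb
      · simp [List.idxOf?_cons, hb, List.idxOf_cons_ne _ (by simpa using hb), ih h1]

theorem pv_p_eq (x : Int) (t : List Int) (s : Int) :
    (PySem.List.index? (PySem.List.slice (x :: t) none (some (max s 0 + 1)))
        ((PySem.List.max? (PySem.List.slice (x :: t) none (some (max s 0 + 1))) (fun y => y)).getD 0)).getD 0
      = pvP x t s := by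
  rw [pv_w_eq, PySem.List.max?_id_cons]
  simp only [Option.getD_some]
  rw [show (pvU t s).foldl max x = pvM x t s from rfl,
      PySem.List.index?_eq_idxOf?, pv_idxOf?_eq _ _ (pv_m_mem x t s)]
  rfl

theorem pv_go_cons (x : Int) (t : List Int) (s : Int) :
    solAltGo (x :: t) s
      = pvM x t s :: solAltGo ((x :: t).eraseIdx (pvP x t s)) (s - (pvP x t s : Int)) := by
  show solAltGoF (t.length + 1) (x :: t) s = _
  rw [solAltGoF]
  simp only [pv_p_eq]
  rw [pv_elem_p]
  have hlen : ((x :: t).eraseIdx (pvP x t s)).length = t.length := by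
    rw [List.length_eraseIdx]
    have := pv_p_le x t s
    simp only [List.length_cons]
    rw [if_pos (by omega)]
    omega
  rw [solAltGo, hlen]

theorem pv_inner (done : List Int) (x : Int) (t tail : List Int) (s : Int) :
    solInner (done ++ (x :: t) ++ tail) (done.length : Int) (min ((t.length : Int) + 1) (s + 1))
      = (pvM x t s, (done.length : Int) + (pvP x t s : Int)) := by
  unfold solInner
  rw [pv_getD_head, PySem.List.pyRange_one]
  have hn : (min ((t.length : Int) + 1) (s + 1) - 1).toNat = (pvU t s).length := by
    simp only [pvU, List.length_take]
    omega
  rw [hn, List.foldl_map]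
  set i := (done.length : Int) with hi
  set u := pvU t s with hu
  have hbody : ∀ (acc : Int × Int), ∀ k ∈ List.range u.length,
      (if PySem.List.pyGetD (done ++ (x :: t) ++ tail) (i + (1 + (k : Int))) 0 > acc.1
        then (PySem.List.pyGetD (done ++ (x :: t) ++ tail) (i + (1 + (k : Int))) 0, i + (1 + (k : Int))) else acc)
      = (if u.getD k 0 > acc.1 then (u.getD k 0, (i + 1) + (k : Int)) else acc) := by
    intro acc k hk
    rw [List.mem_range] at hk
    have hkt : k < t.length := by
      have : u.length ≤ t.length := by rw [hu, pvU]; simp [List.length_take]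
      omega
    have h1 : i + (1 + (k : Int)) = i + 1 + (k : Int) := by ring
    have h2 : PySem.List.pyGetD (done ++ (x :: t) ++ tail) (i + (1 + (k : Int))) 0 = u.getD k 0 := by
      have hkb : k < (max s 0).toNat := by
        have : u.length = min (max s 0).toNat t.length := by rw [hu, pvU]; simp [List.length_take]
        omega
      rw [h1, pv_getD_mid done x t tail k hkt, hu, pvU]
      simp [List.getD, List.getElem?_take_of_lt hkb]
    rw [h2, h1]
  rw [PySem.List.foldl_congr_mem _ _ _ _ hbody, pv_scan u x i (i + 1)]
  have hM : u.foldl max x = pvM x t s := rfl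
  rw [hM]
  by_cases hx : x < pvM x t s
  · rw [if_pos hx]
    have hne : x ≠ pvM x t s := by omega
    have hp : pvP x t s = u.idxOf (pvM x t s) + 1 := by
      rw [pvP, List.idxOf_cons_ne _ hne]
    rw [hp]
    push_cast; ring_nf
  · rw [if_neg hx]
    have hxM : x = pvM x t s := by
      have hge := (PySem.List.le_foldl_max u x).1
      have : x ≤ pvM x t s := hge
      omega
    have : pvP x t s = 0 := by rw [pvP, ← hxM, List.idxOf_cons_self]
    rw [this]
    simp

theorem pv_getElem_p (x : Int) (t : List Int) (s : Int) (h : pvP x t s < (x :: t).length) :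
    (x :: t)[pvP x t s] = pvM x t s := by
  have h1 := pv_elem_p x t s
  rw [PySem.List.pyGetD_natCast] at h1
  rwa [List.getD, List.getElem?_eq_getElem h, Option.getD_some] at h1

theorem pv_stepA (done : List Int) (x : Int) (t tail : List Int) (s : Int) :
    solBody ((done.length + (t.length + 1) : Nat) : Int) (done ++ (x :: t) ++ tail, s) (done.length : Int)
      = (done ++ pvM x t s :: ((x :: t).eraseIdx (pvP x t s) ++ tail), s - (pvP x t s : Int)) := by
  unfold solBody
  have hNi : ((done.length + (t.length + 1) : Nat) : Int) - (done.length : Int) = (t.length : Int) + 1 := by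
    push_cast; ring
  simp only [hNi]
  rw [pv_inner done x t tail s]
  set p := pvP x t s with hp
  by_cases hp0 : p = 0
  · rw [if_pos (by rw [hp0]; simp)]
    have hple := pv_p_le x t s
    have hxM : x = pvM x t s := by
      by_contra hne
      have hP0 : pvP x t s = 0 := by rw [← hp]; exact hp0
      rw [pvP, List.idxOf_cons_ne _ hne] at hP0
      simp at hP0
    rw [hp0, ← hxM]
    simp [List.eraseIdx_cons_zero]
  · have hne : (done.length : Int) + (p : Int) ≠ (done.length : Int) := by
      have : 0 < p := Nat.pos_of_ne_zero hp0
      omega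
    rw [if_neg hne]
    have hple := pv_p_le x t s
    have hlt : p < (x :: t).length := by simp only [List.length_cons]; omega
    set c := (x :: t).take p with hc
    set r := (x :: t).drop (p + 1) with hr
    have hdecomp : x :: t = c ++ pvM x t s :: r := by
      conv_lhs => rw [← List.take_append_drop p (x :: t)]
      rw [List.drop_eq_getElem_cons hlt, pv_getElem_p x t s hlt]
    have hclen : c.length = p := by rw [hc, List.length_take]; omega
    have hshape : done ++ (x :: t) ++ tail = done ++ c ++ pvM x t s :: (r ++ tail) := by
      rw [hdecomp]; simp
    have hhi : (done.length : Int) + (p : Int) = (done.length : Int) + (c.length : Int) := by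
      rw [hclen]
    rw [hshape, hhi, pv_rot c done (pvM x t s) (r ++ tail)]
    have herase : (x :: t).eraseIdx p = c ++ r := by
      rw [List.eraseIdx_eq_take_drop_succ]
    simp only [Prod.mk.injEq]
    refine ⟨?_, by rw [hclen]; ring⟩
    rw [herase]
    simp

theorem solAltGo_nil (s : Int) : solAltGo [] s = [] := rfl

theorem pv_outer (k : Nat) : ∀ (lst : List Int), lst.length = k → ∀ (done tail : List Int) (s : Int),
    ∃ s', (PySem.List.pyRange (done.length : Int) ((done.length + k : Nat) : Int) 1).foldl
            (solBody ((done.length + k : Nat) : Int)) (done ++ lst ++ tail, s)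
          = (done ++ solAltGo lst s ++ tail, s') := by
  induction k with
  | zero =>
    intro lst hl done tail s
    have : lst = [] := List.eq_nil_of_length_eq_zero hl
    subst this
    refine ⟨s, ?_⟩
    rw [PySem.List.pyRange_one_eq_nil (by simp)]
    simp [solAltGo_nil]
  | succ k ih =>
    intro lst hl done tail s
    rcases lst with _ | ⟨x, t⟩
    · simp at hl
    have ht : t.length = k := by simpa using hl
    obtain rfl := ht.symm
    have hcons : PySem.List.pyRange (done.length : Int) ((done.length + (t.length + 1) : Nat) : Int) 1
        = (done.length : Int) :: PySem.List.pyRange ((done.length : Int) + 1) ((done.length + (t.length + 1) : Nat) : Int) 1 :=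
      PySem.List.pyRange_one_cons (by push_cast; omega)
    rw [hcons, List.foldl_cons, pv_stepA]
    set p := pvP x t s with hp
    set E := (x :: t).eraseIdx p with hE
    have hElen : E.length = t.length := by
      rw [hE, List.length_eraseIdx]
      have := pv_p_le x t s
      simp only [List.length_cons]
      rw [if_pos (by omega)]
      omega
    set done' := done ++ [pvM x t s] with hdone'
    have hshape : done ++ pvM x t s :: (E ++ tail) = done' ++ E ++ tail := by
      rw [hdone']; simp
    have hd' : (done'.length : Int) = (done.length : Int) + 1 := by rw [hdone']; simp
    have hN : ((done.length + (t.length + 1) : Nat) : Int) = ((done'.length + E.length : Nat) : Int) := by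
      rw [hdone', hElen]; push_cast; simp; ring
    rw [hshape, hN, ← hd', hElen]
    obtain ⟨s', hfold⟩ := ih E hElen done' tail (s - (p : Int))
    refine ⟨s', ?_⟩
    rw [hfold, pv_go_cons x t s, ← hp, ← hE, hdone']
    simp

theorem pv_main (N : Int) (nums : List Int) (S : Int) (hpre : N ≤ (nums.length : Int)) :
    solution N nums S = solution_alt N nums S := by
  unfold solution solution_alt
  by_cases hN : 0 ≤ N
  · have hmax : max N 0 = N := by omega
    set n := N.toNat with hn
    have hNn : N = (n : Int) := by omega
    have hlen : (nums.take n).length = n := by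
      rw [List.length_take]
      omega
    obtain ⟨s', hfold⟩ := pv_outer n (nums.take n) hlen [] (nums.drop n) S
    simp only [List.length_nil, List.nil_append, Nat.zero_add] at hfold
    rw [List.take_append_drop] at hfold
    rw [hmax, hNn]
    dsimp only
    rw [PySem.List.slice_to_natCast, PySem.List.slice_from_natCast]
    rw [show (((0 : Nat)) : Int) = ((0 : Int)) by simp] at hfold
    rw [hfold]
  · have hmax : max N 0 = 0 := by omega
    rw [hmax, PySem.List.pyRange_one_eq_nil (by omega)]
    simp only [List.foldl_nil]
    rw [PySem.List.slice_to nums (le_refl 0), PySem.List.slice_from nums (le_refl 0)]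
    simp [solAltGo_nil]

-- ===== VERDICT (by name: the statement is the Claim_ definition above) =====
theorem solution_spec : Claim_equal_solution := by
  intro N nums S _ hpre
  unfold Spec_solution
  exact pv_main N nums S hpre
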